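-- pv_equiv track=rewrite | github.com/zmockwebdesign/collatz-v2 | final_test.py | collatz_fast
-- ===== SOURCE A (Python) =====
-- def collatz_fast(n):
--     sequence = [n]
--     downsteps = []
--     step = 0
--     consecutive_even = 0
--     downstep_start = -1
--
--     while n != 1:
--         if n & 1:
--             if consecutive_even >= 2:
--                 downsteps.append((downstep_start, consecutive_even))
--             consecutive_even = 0
--             downstep_start = -1
--             n = 3 * n + 1
--         else:
--             if consecutive_even == 0:
--                 downstep_start = step
--             consecutive_even += 1
--             n = n >> 1
--         sequence.append(n)
--         step += 1
--
--     if consecutive_even >= 2: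
--         downsteps.append((downstep_start, consecutive_even))
--
--     return sequence, downsteps
-- ===== SOURCE B (Python) =====
-- def collatz_fast(n):
--     sequence = [n]
--     while n != 1:
--         n = 3 * n + 1 if n % 2 else n >> 1
--         sequence.append(n)
--     downsteps = []
--     run = 0
--     for i, v in enumerate(sequence):
--         if v % 2 == 0:
--             run += 1
--         else:
--             if run >= 2:
--                 downsteps.append((i - run, run))
--             run = 0
--     if run >= 2:
--         downsteps.append((len(sequence) - run, run))
--     return sequence, downsteps
-- ===== Notes on version B (the rewrite author's own statement) =====
-- stated objective: simpler
-- what changed: B separates the two concerns: it first builds the whole Collatz sequence in one loop, then finds maximal runs of consecutive even values in a single enumerate pass with a run counter (start recovered as i - run), instead of A's single loop interleaving sequence building with run/start/step bookkeeping.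
import Mathlib
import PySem

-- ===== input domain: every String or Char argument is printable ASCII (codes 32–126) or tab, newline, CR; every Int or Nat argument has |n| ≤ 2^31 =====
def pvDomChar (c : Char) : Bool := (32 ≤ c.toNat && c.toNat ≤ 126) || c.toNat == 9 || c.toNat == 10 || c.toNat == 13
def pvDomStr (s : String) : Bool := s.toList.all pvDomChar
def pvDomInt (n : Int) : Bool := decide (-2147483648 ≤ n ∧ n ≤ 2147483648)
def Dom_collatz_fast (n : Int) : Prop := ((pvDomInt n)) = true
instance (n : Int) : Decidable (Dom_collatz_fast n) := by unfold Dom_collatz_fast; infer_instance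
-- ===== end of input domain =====

-- B builds the sequence first and then scans it for even runs in a second pass,
-- instead of A's single loop with interleaved run bookkeeping (objective: simpler).

-- ===== PORT A =====
-- fuel bounds the number of loop iterations; the Python loop terminates for every
-- n ≥ 1 admitted by Pre_ within far fewer iterations (well under 5000 for |n| ≤ 2^31), so
-- the fuel-exhaustion branch is never reached behaviourally; its value is chosen as
-- one consistent truncation of the loop (finalize the current run at the unexamined
-- current element), since the Python program has no value there (it diverges only
-- for n ≤ 0, which Pre_ excludes).
def collatzLoopA : Nat → Int → List Int → List (Int × Int) → Int → Int → Int →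
    List Int × List (Int × Int)
  | 0, n, seq, ds, step, ce, dstart =>
      if PySem.Int.mod n 2 = 0 then
        (seq, if ce + 1 ≥ 2 then ds ++ [((if ce = 0 then step else dstart), ce + 1)] else ds)
      else
        (seq, if ce ≥ 2 then ds ++ [(dstart, ce)] else ds)
  | fuel + 1, n, seq, ds, step, ce, dstart =>
      if n = 1 then
        -- loop exit: final flush
        (seq, if ce ≥ 2 then ds ++ [(dstart, ce)] else ds)
      else if PySem.Int.mod n 2 = 1 then
        -- odd branch: flush run, n = 3*n+1
        collatzLoopA fuel (3 * n + 1) (seq ++ [3 * n + 1])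
          (if ce ≥ 2 then ds ++ [(dstart, ce)] else ds) (step + 1) 0 (-1)
      else
        -- even branch: extend run, n = n >> 1
        collatzLoopA fuel (PySem.Int.floordiv n 2) (seq ++ [PySem.Int.floordiv n 2])
          ds (step + 1) (ce + 1) (if ce = 0 then step else dstart)

def collatz_fast (n : Int) : List Int × (List (Int × Int)) :=
  collatzLoopA 5000 n [n] [] 0 0 (-1)

-- ===== PORT B =====
-- pass 1: the elements appended after the initial n (same fuel as port A)
def collatzSeqB : Nat → Int → List Int
  | 0, _ => []
  | fuel + 1, n =>
      if n = 1 then []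
      else
        let n' := if PySem.Int.mod n 2 = 1 then 3 * n + 1 else PySem.Int.floordiv n 2
        n' :: collatzSeqB fuel n'

-- pass 2: the enumerate loop with run counter; on the empty rest, the post-loop
-- flush (i has reached len(sequence))
def collatzScanB : List Int → Int → Int → List (Int × Int) → List (Int × Int)
  | [], i, run, ds => if run ≥ 2 then ds ++ [(i - run, run)] else ds
  | v :: rest, i, run, ds =>
      if PySem.Int.mod v 2 = 0 then collatzScanB rest (i + 1) (run + 1) ds
      else collatzScanB rest (i + 1) 0 (if run ≥ 2 then ds ++ [(i - run, run)] else ds)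

def collatz_fast_alt (n : Int) : List Int × (List (Int × Int)) :=
  let sequence := n :: collatzSeqB 5000 n
  (sequence, collatzScanB sequence 0 0 [])

-- ===== PRECONDITION & SPEC =====
-- Pre_ excludes n ≤ 0, on which the Python loop never reaches 1 and A diverges.
def Pre_collatz_fast (n : Int) : Prop := 1 ≤ n
instance (n : Int) : Decidable (Pre_collatz_fast n) := by unfold Pre_collatz_fast; infer_instance
def pvWitness_collatz_fast : Int := 6

def Spec_collatz_fast (n : Int) (out : List Int × (List (Int × Int))) : Prop := out = collatz_fast_alt n
instance (n : Int) (out : List Int × (List (Int × Int))) : Decidable (Spec_collatz_fast n out) := by unfold Spec_collatz_fast; infer_instance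

-- ===== CLAIM (what is proved, stated in full; the proofs are below) =====
def Claim_equal_collatz_fast : Prop := ∀ (n : Int), Dom_collatz_fast n → Pre_collatz_fast n → Spec_collatz_fast n (collatz_fast n)

-- ===== LEMMAS AND PROOFS =====

theorem pymod_two (n : Int) : PySem.Int.mod n 2 = 0 ∨ PySem.Int.mod n 2 = 1 := by
  rw [PySem.Int.mod_eq_emod_of_pos (by omega)]
  omega

theorem pos_step_odd (n : Int) (h : 1 ≤ n) : 1 ≤ 3 * n + 1 := by omega

theorem pos_step_even (n : Int) (h1 : 1 ≤ n)
    (he : PySem.Int.mod n 2 = 0) : 1 ≤ PySem.Int.floordiv n 2 := by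
  rw [PySem.Int.floordiv_eq_ediv_of_pos (by omega)]
  rw [PySem.Int.mod_eq_emod_of_pos (by omega)] at he
  omega

theorem scan_nil (i run : Int) (ds : List (Int × Int)) :
    collatzScanB [] i run ds = if run ≥ 2 then ds ++ [(i - run, run)] else ds := rfl

theorem scan_cons_even (v : Int) (rest : List Int) (i run : Int) (ds : List (Int × Int))
    (h : PySem.Int.mod v 2 = 0) :
    collatzScanB (v :: rest) i run ds = collatzScanB rest (i + 1) (run + 1) ds := by
  simp only [collatzScanB, if_pos h]

theorem scan_cons_odd (v : Int) (rest : List Int) (i run : Int) (ds : List (Int × Int))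
    (h : ¬ PySem.Int.mod v 2 = 0) :
    collatzScanB (v :: rest) i run ds =
      collatzScanB rest (i + 1) 0 (if run ≥ 2 then ds ++ [(i - run, run)] else ds) := by
  simp only [collatzScanB, if_neg h]

-- main invariant: A's loop equals (sequence so far ++ remaining sequence,
-- scan of the remaining sequence starting at index `step` with run `ce`)
theorem loopA_eq_scan : ∀ (fuel : Nat) (n : Int) (seq : List Int)
    (ds : List (Int × Int)) (step ce dstart : Int),
    1 ≤ n → 0 ≤ ce → (1 ≤ ce → dstart = step - ce) →
    collatzLoopA fuel n seq ds step ce dstart =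
      (seq ++ collatzSeqB fuel n, collatzScanB (n :: collatzSeqB fuel n) step ce ds) := by
  intro fuel
  induction fuel with
  | zero =>
    intro n seq ds step ce dstart hn hce hds
    rcases pymod_two n with he | ho
    · rw [show collatzSeqB 0 n = [] from rfl, scan_cons_even n [] step ce ds he, scan_nil]
      simp only [collatzLoopA, if_pos he, List.append_nil]
      by_cases h2 : ce + 1 ≥ 2
      · rw [if_pos h2, if_pos h2]
        by_cases h0 : ce = 0
        · subst h0; norm_num
        · rw [if_neg h0, hds (by omega)]
          have : step + 1 - (ce + 1) = step - ce := by ring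
          rw [this]
      · rw [if_neg h2, if_neg h2]
    · have he : ¬ PySem.Int.mod n 2 = 0 := by omega
      rw [show collatzSeqB 0 n = [] from rfl, scan_cons_odd n [] step ce ds he]
      simp only [collatzLoopA, if_neg he, List.append_nil, scan_nil, ge_iff_le,
        show ¬ (2 : Int) ≤ 0 by norm_num, if_false]
      by_cases h2 : ce ≥ 2
      · rw [if_pos h2, if_pos h2, hds (by omega)]
      · rw [if_neg h2, if_neg h2]
  | succ fuel ih =>
    intro n seq ds step ce dstart hn hce hds
    by_cases h1 : n = 1
    · subst h1
      have ho : ¬ PySem.Int.mod (1 : Int) 2 = 0 := by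
        rw [PySem.Int.mod_eq_emod_of_pos (by omega)]; decide
      rw [show collatzSeqB (fuel + 1) 1 = [] by simp [collatzSeqB],
        scan_cons_odd 1 [] step ce ds ho, scan_nil]
      simp only [collatzLoopA, ite_true, List.append_nil, ge_iff_le,
        show ¬ (2 : Int) ≤ 0 by norm_num, if_false]
      by_cases h2 : ce ≥ 2
      · rw [if_pos h2, if_pos h2, hds (by omega)]
      · rw [if_neg h2, if_neg h2]
    · rcases pymod_two n with he | ho
      · have ho' : ¬ PySem.Int.mod n 2 = 1 := by omega
        have hseq : collatzSeqB (fuel + 1) n =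
            PySem.Int.floordiv n 2 :: collatzSeqB fuel (PySem.Int.floordiv n 2) := by
          simp only [collatzSeqB, if_neg h1, if_neg ho']
        rw [hseq, scan_cons_even n _ step ce ds he]
        simp only [collatzLoopA, if_neg h1, if_neg ho']
        rw [ih (PySem.Int.floordiv n 2) (seq ++ [PySem.Int.floordiv n 2]) ds (step + 1)
            (ce + 1) (if ce = 0 then step else dstart)
            (pos_step_even n hn he) (by omega) ?_]
        · simp
        · intro _
          by_cases h0 : ce = 0
          · rw [if_pos h0, h0]; ring
          · rw [if_neg h0, hds (by omega)]; ring
      · have he' : ¬ PySem.Int.mod n 2 = 0 := by omega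
        have hseq : collatzSeqB (fuel + 1) n = (3 * n + 1) :: collatzSeqB fuel (3 * n + 1) := by
          simp only [collatzSeqB, if_neg h1, if_pos ho]
        rw [hseq, scan_cons_odd n _ step ce ds he']
        simp only [collatzLoopA, if_neg h1, if_pos ho]
        rw [ih (3 * n + 1) (seq ++ [3 * n + 1])
            (if ce ≥ 2 then ds ++ [(dstart, ce)] else ds) (step + 1) 0 (-1)
            (pos_step_odd n hn) (by omega) (by omega)]
        by_cases h2 : ce ≥ 2
        · rw [if_pos h2, if_pos h2, hds (by omega)]; simp
        · rw [if_neg h2, if_neg h2]; simp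

-- ===== VERDICT (by name: the statement is the Claim_ definition above) =====
theorem collatz_fast_spec : Claim_equal_collatz_fast := by
  intro n _ hpre
  unfold Spec_collatz_fast collatz_fast collatz_fast_alt
  rw [loopA_eq_scan 5000 n [n] [] 0 0 (-1) hpre (by omega) (by omega)]
  simp
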